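-- pv_equiv track=rewrite | github.com/maria2162004/1st-Python-project- | Problem 1.py | octal_to_hexa
-- ===== SOURCE A (Python) =====
-- def octal_to_hexa(n):
--     octal_num = int(n)
--     hex_num = 0
--     power = 0
--     while octal_num > 0:
--         digit = octal_num % 16
--         hex_num += digit * (10 ** power)
--         octal_num = octal_num // 16
--         power += 1
--     return hex_num
-- ===== SOURCE B (Python) =====
-- def octal_to_hexa(n):
--     v = int(n)
--     digits = []
--     while v > 0:
--         digits.append(v % 16)
--         v //= 16
--     total = 0
--     for d in reversed(digits):
--         total = total * 10 + d
--     return total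
-- ===== Notes on version B (the rewrite author's own statement) =====
-- stated objective: alternative
-- what changed: Two staged passes instead of one accumulating loop: first collect the base-16 digits into a list, then repack them into a decimal number by a Horner fold over the reversed list, eliminating the explicit power-of-ten counter.
import Mathlib
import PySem

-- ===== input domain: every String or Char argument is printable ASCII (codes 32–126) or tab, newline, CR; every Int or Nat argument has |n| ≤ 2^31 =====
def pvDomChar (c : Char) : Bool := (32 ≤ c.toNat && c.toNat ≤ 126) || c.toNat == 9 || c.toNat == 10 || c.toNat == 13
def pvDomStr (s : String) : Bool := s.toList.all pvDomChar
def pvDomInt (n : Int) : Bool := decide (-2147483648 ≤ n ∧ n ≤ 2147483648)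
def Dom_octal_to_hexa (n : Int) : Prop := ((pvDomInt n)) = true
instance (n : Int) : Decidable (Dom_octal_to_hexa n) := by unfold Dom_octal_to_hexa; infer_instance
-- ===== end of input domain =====

-- B replaces A's single accumulating loop (with a power-of-ten counter) by two
-- staged passes: collect the base-16 digits into a list, then Horner-fold the
-- reversed list into a decimal number.


-- ===== PORT A =====
-- while octal_num > 0: digit = octal_num % 16; hex_num += digit * 10**power; octal_num //= 16; power += 1
def octalLoopA (octal_num hex_num : Int) (power : Nat) : Int :=
  if _h : octal_num > 0 then
    octalLoopA (PySem.Int.floordiv octal_num 16)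
      (hex_num + PySem.Int.mod octal_num 16 * 10 ^ power) (power + 1)
  else hex_num
termination_by octal_num.toNat
decreasing_by
  rw [PySem.Int.floordiv_eq_ediv_of_pos (by omega : (0:Int) < 16)]; omega

def octal_to_hexa (n : Int) : Int := octalLoopA n 0 0

-- ===== PORT B =====
-- pass 1: while v > 0: digits.append(v % 16); v //= 16
def hexDigits (v : Int) : List Int :=
  if _h : v > 0 then
    PySem.Int.mod v 16 :: hexDigits (PySem.Int.floordiv v 16)
  else []
termination_by v.toNat
decreasing_by
  rw [PySem.Int.floordiv_eq_ediv_of_pos (by omega : (0:Int) < 16)]; omega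

-- pass 2: for d in reversed(digits): total = total * 10 + d
def octal_to_hexa_alt (n : Int) : Int :=
  (hexDigits n).reverse.foldl (fun total d => total * 10 + d) 0

-- ===== PRECONDITION & SPEC =====
def Spec_octal_to_hexa (n : Int) (out : Int) : Prop := out = octal_to_hexa_alt n
instance (n : Int) (out : Int) : Decidable (Spec_octal_to_hexa n out) := by unfold Spec_octal_to_hexa; infer_instance

-- ===== CLAIM (what is proved, stated in full; the proofs are below) =====
def Claim_equal_octal_to_hexa : Prop := ∀ (n : Int), Dom_octal_to_hexa n → Spec_octal_to_hexa n (octal_to_hexa n)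

-- ===== LEMMAS AND PROOFS =====

-- little-endian decimal value of a digit list
def valL : List Int → Int
  | [] => 0
  | d :: ds => d + 10 * valL ds

lemma loopA_eq_valL (k : Nat) : ∀ (v acc : Int) (p : Nat), v.toNat ≤ k →
    octalLoopA v acc p = acc + valL (hexDigits v) * 10 ^ p := by
  induction k with
  | zero =>
    intro v acc p hv
    rw [octalLoopA, hexDigits]
    have : ¬ v > 0 := by omega
    simp [this, valL]
  | succ k ih =>
    intro v acc p hv
    rw [octalLoopA, hexDigits]
    by_cases h : v > 0
    · have hlt : (PySem.Int.floordiv v 16).toNat ≤ k := by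
        rw [PySem.Int.floordiv_eq_ediv_of_pos (by omega : (0:Int) < 16)]; omega
      simp only [h, dite_true]
      rw [ih _ _ _ hlt, valL, pow_succ]
      ring
    · simp [h, valL]

lemma foldl_reverse_eq_valL (l : List Int) :
    l.reverse.foldl (fun total d => total * 10 + d) 0 = valL l := by
  rw [List.foldl_reverse]
  induction l with
  | nil => simp [valL]
  | cons d ds ih => simp [valL, ih]; ring

-- ===== VERDICT (by name: the statement is the Claim_ definition above) =====
theorem octal_to_hexa_spec : Claim_equal_octal_to_hexa := by
  intro n _
  show octal_to_hexa n = octal_to_hexa_alt n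
  unfold octal_to_hexa octal_to_hexa_alt
  rw [loopA_eq_valL n.toNat n 0 0 le_rfl, foldl_reverse_eq_valL]
  ring
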